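-- pv_equiv track=rewrite | github.com/rrluthi/aoc2023 | day15/2.py | hash_step
-- ===== SOURCE A (Python) =====
-- def hash_step(value, step):
--     if len(step) == 0:
--         return value
--     char_code = ord(step[0])
--     value += char_code
--     value *= 17
--     value %= 256
--     return hash_step(value, step[1:])
-- ===== SOURCE B (Python) =====
-- def hash_step(value, step):
--     for c in step:
--         value = ((value + ord(c)) * 17) % 256
--     return value
-- ===== Notes on version B (the rewrite author's own statement) =====
-- stated objective: faster
-- what changed: Replaced the tail recursion over step[1:] (which copies the remaining string at every call) with a single flat for-loop over the characters maintaining the running hash in the accumulator.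
import Mathlib
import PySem

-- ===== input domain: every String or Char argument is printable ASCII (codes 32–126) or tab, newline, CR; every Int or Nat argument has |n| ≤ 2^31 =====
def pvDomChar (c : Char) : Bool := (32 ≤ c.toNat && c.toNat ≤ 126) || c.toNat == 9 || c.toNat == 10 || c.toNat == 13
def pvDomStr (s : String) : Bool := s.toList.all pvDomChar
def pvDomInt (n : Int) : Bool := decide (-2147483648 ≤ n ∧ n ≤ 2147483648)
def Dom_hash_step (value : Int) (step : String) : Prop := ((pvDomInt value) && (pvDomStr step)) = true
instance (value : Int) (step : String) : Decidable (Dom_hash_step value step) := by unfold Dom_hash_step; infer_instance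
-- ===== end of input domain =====

-- B replaces A's tail recursion over step[1:] with a single flat loop over the characters (simpler decomposition, same values).
-- ===== PORT A =====
-- recursion over the character list: step[0] = head, step[1:] = tail
def hash_step_rec (value : Int) (step : List Char) : Int :=
  match step with
  | [] => value
  | c :: rest =>
    let char_code : Int := c.toNat
    let value := value + char_code
    let value := value * 17
    let value := PySem.Int.mod value 256
    hash_step_rec value rest

def hash_step (value : Int) (step : String) : Int :=
  hash_step_rec value step.toList

-- ===== PORT B =====
def hash_step_alt (value : Int) (step : String) : Int :=
  step.toList.foldl (fun value c => PySem.Int.mod ((value + (c.toNat : Int)) * 17) 256) value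

-- ===== PRECONDITION & SPEC =====
def Spec_hash_step (value : Int) (step : String) (out : Int) : Prop := out = hash_step_alt value step
instance (value : Int) (step : String) (out : Int) : Decidable (Spec_hash_step value step out) := by unfold Spec_hash_step; infer_instance

-- ===== CLAIM (what is proved, stated in full; the proofs are below) =====
def Claim_equal_hash_step : Prop := ∀ (value : Int) (step : String), Dom_hash_step value step → Spec_hash_step value step (hash_step value step)

-- ===== LEMMAS AND PROOFS =====

-- ===== VERDICT (by name: the statement is the Claim_ definition above) =====
theorem rec_eq_foldl (l : List Char) (value : Int) :
    hash_step_rec value l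
      = l.foldl (fun value c => PySem.Int.mod ((value + (c.toNat : Int)) * 17) 256) value := by
  induction l generalizing value with
  | nil => rfl
  | cons c rest ih => simp [hash_step_rec, List.foldl, ih]

-- ===== VERDICT =====
theorem hash_step_spec : Claim_equal_hash_step := by
  intro value step _
  unfold Spec_hash_step hash_step hash_step_alt
  exact rec_eq_foldl _ _
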